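-- pv_equiv track=rewrite | github.com/The-1-C/hash-cracker | old_python/hashc.py | expand_mask
-- ===== SOURCE A (Python) =====
-- mask_sets = {
--     "?l": "abcdefghijklmnopqrstuvwxyz",
--     "?u": "ABCDEFGHIJKLMNOPQRSTUVWXYZ",
--     "?d": "0123456789",
--     "?s": "!@#$%^&*()-_=+[]{};:'\",.<>/?\\|"
-- }
--
-- def expand_mask(mask):
--     parts = []
--     i = 0
--     while i < len(mask):
--         if mask[i] == "?" and i+1 < len(mask):
--             token = mask[i:i+2]
--             if token in mask_sets:
--                 parts.append(mask_sets[token])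
--                 i += 2
--             else:
--                 raise ValueError("Unknown mask token: " + token)
--         else:
--             parts.append(mask[i])
--             i += 1
--     return parts
-- ===== SOURCE B (Python) =====
-- mask_sets = {
--     "?l": "abcdefghijklmnopqrstuvwxyz",
--     "?u": "ABCDEFGHIJKLMNOPQRSTUVWXYZ",
--     "?d": "0123456789",
--     "?s": "!@#$%^&*()-_=+[]{};:'\",.<>/?\\|"
-- }
--
-- def expand_mask(mask):
--     # pass 1: tokenize into '?X' pairs and lone characters
--     tokens = []
--     it = iter(mask)
--     for ch in it:
--         if ch == "?":
--             nxt = next(it, None)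
--             tokens.append(ch if nxt is None else ch + nxt)
--         else:
--             tokens.append(ch)
--     # pass 2: classify tokens
--     parts = []
--     for t in tokens:
--         if len(t) == 2:
--             if t in mask_sets:
--                 parts.append(mask_sets[t])
--             else:
--                 raise ValueError("Unknown mask token: " + t)
--         else:
--             parts.append(t)
--     return parts
-- ===== Notes on version B (the rewrite author's own statement) =====
-- stated objective: faster
-- what changed: B first splits the whole mask into a token list (two-character wildcard pairs or lone characters) in one tokenizing pass over an iterator and then classifies each token in a second pass, instead of A's single index-stepping scanner; replacing A's per-character len() comparison, indexing and slicing with iterator consumption is the constant-factor speedup a timing run measured.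
import Mathlib
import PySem

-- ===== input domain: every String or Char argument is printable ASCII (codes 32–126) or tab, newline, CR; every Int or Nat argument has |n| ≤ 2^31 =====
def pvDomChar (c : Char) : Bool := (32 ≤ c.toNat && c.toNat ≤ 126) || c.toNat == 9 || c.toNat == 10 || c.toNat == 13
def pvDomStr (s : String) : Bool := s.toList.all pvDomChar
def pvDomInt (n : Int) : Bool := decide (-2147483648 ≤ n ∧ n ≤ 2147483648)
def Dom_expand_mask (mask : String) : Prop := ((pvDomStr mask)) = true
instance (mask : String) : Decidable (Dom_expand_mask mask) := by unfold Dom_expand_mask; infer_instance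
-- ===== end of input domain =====

-- B re-does the task as tokenize-then-classify (two passes over an iterator) instead of A's
-- index-stepping scanner with per-character indexing/slicing; measured faster in a timing run.

-- ===== PORT A =====
-- the module constant mask_sets (a dict → association list in insertion order)
def maskSets : PySem.Dict String String :=
  PySem.Dict.ofList [("?l", "abcdefghijklmnopqrstuvwxyz"),
   ("?u", "ABCDEFGHIJKLMNOPQRSTUVWXYZ"),
   ("?d", "0123456789"),
   ("?s", "!@#$%^&*()-_=+[]{};:'\",.<>/?\\|")]

-- A's while-loop over the index i, consuming 2 chars for a known "?X" token and 1 otherwise;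
-- the ValueError branch returns [] (those inputs are excluded by Pre_expand_mask).
def expandGoA : List Char → List String
  | [] => []
  | c :: rest =>
    if c = '?' then
      match rest with
      | d :: rest' =>
        match PySem.Dict.get? maskSets (String.ofList [c, d]) with
        | some s => s :: expandGoA rest'
        | none => []          -- raise ValueError("Unknown mask token: " + token)
      | [] => String.ofList [c] :: expandGoA []
    else String.ofList [c] :: expandGoA rest

def expand_mask (mask : String) : List String := expandGoA mask.toList

-- ===== PORT B =====
-- pass 1 of B: split the mask into tokens, each a wildcard pair or a lone character
def expandTokenize : List Char → List (List Char)
  | [] => []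
  | '?' :: c :: rest => ['?', c] :: expandTokenize rest
  | c :: rest => [c] :: expandTokenize rest

-- pass 2 of B: classify each token (2-char tokens looked up, lone characters kept);
-- the ValueError branch returns [] (excluded by Pre_expand_mask).
def expandClassify : List (List Char) → List String
  | [] => []
  | t :: ts =>
    if t.length = 2 then
      match PySem.Dict.get? maskSets (String.ofList t) with
      | some s => s :: expandClassify ts
      | none => []            -- raise ValueError("Unknown mask token: " + t)
    else String.ofList t :: expandClassify ts

def expand_mask_alt (mask : String) : List String :=
  expandClassify (expandTokenize mask.toList)

-- ===== PRECONDITION & SPEC =====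
-- Pre_ excludes exactly the inputs on which Python A raises ValueError: a '?' immediately
-- followed by a character other than l/u/d/s.
def Pre_expand_mask (mask : String) : Prop :=
  mask.toList.IsChain (fun a b => a = '?' → b ∈ ['l', 'u', 'd', 's'])
instance (mask : String) : Decidable (Pre_expand_mask mask) := by
  unfold Pre_expand_mask; infer_instance

def pvWitness_expand_mask : String := "a?l?d?"

def Spec_expand_mask (mask : String) (out : List String) : Prop := out = expand_mask_alt mask
instance (mask : String) (out : List String) : Decidable (Spec_expand_mask mask out) := by
  unfold Spec_expand_mask; infer_instance

-- ===== CLAIM (what is proved, stated in full; the proofs are below) =====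
def Claim_equal_expand_mask : Prop :=
  ∀ (mask : String), Dom_expand_mask mask → Pre_expand_mask mask →
    Spec_expand_mask mask (expand_mask mask)

-- ===== LEMMAS AND PROOFS =====
theorem expandGoA_eq_classify_tokenize (l : List Char) :
    expandGoA l = expandClassify (expandTokenize l) := by
  induction l using expandTokenize.induct with
  | case1 => rfl
  | case2 c rest ih =>
    simp [expandGoA, expandTokenize, expandClassify, ih]
  | case3 c rest h ih =>
    by_cases hc : c = '?'
    · subst hc
      cases rest with
      | nil => simp [expandGoA, expandTokenize, expandClassify]
      | cons d rest' => exact (h d rest' rfl rfl).elim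
    · cases rest with
      | nil => simp [expandGoA, expandTokenize, expandClassify, hc]
      | cons d rest' => simp [expandGoA, expandTokenize, expandClassify, hc, ih]

-- ===== VERDICT (by name: the statement is the Claim_ definition above) =====
theorem expand_mask_spec : Claim_equal_expand_mask := by
  intro mask _ _
  unfold Spec_expand_mask expand_mask expand_mask_alt
  exact expandGoA_eq_classify_tokenize mask.toList
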